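-- pv_equiv track=rewrite | github.com/densebamboo/CrosswordAP | apworld/crossword_ap/puzzle_generator.py | _find_letter_bounds
-- ===== SOURCE A (Python) =====
-- from typing import Any, Dict, Iterable, List, Optional, Sequence, Tuple
--
-- def _find_letter_bounds(board: List[List[str]]) -> Optional[Tuple[int, int, int, int]]:
--     rows = len(board)
--     if rows == 0:
--         return None
--     cols = len(board[0])
--     min_row = rows
--     max_row = -1
--     min_col = cols
--     max_col = -1
--
--     for r in range(rows):
--         for c in range(cols):
--             value = board[r][c]
--             if value == "#" or value == "":
--                 continue
--             if r < min_row: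
--                 min_row = r
--             if r > max_row:
--                 max_row = r
--             if c < min_col:
--                 min_col = c
--             if c > max_col:
--                 max_col = c
--
--     if max_row == -1 or max_col == -1:
--         return None
--     return min_row, max_row, min_col, max_col
-- ===== SOURCE B (Python) =====
-- from typing import List, Optional, Tuple
--
-- def _find_letter_bounds(board: List[List[str]]) -> Optional[Tuple[int, int, int, int]]:
--     rows = len(board)
--     if rows == 0:
--         return None
--     cols = len(board[0])
--
--     def letter(r: int, c: int) -> bool:
--         v = board[r][c]
--         return v != "#" and v != ""
--
--     def row_has(r: int) -> bool:
--         return any(letter(r, c) for c in range(cols))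
--
--     def col_has(c: int) -> bool:
--         return any(letter(r, c) for r in range(rows))
--
--     # Shrink the bounding box in from the four edges: find the first/last row
--     # containing a letter, then the first/last column containing one.
--     min_row = next((r for r in range(rows) if row_has(r)), None)
--     if min_row is None:
--         return None
--     max_row = next(r for r in reversed(range(rows)) if row_has(r))
--     min_col = next(c for c in range(cols) if col_has(c))
--     max_col = next(c for c in reversed(range(cols)) if col_has(c))
--     return min_row, max_row, min_col, max_col
-- ===== Notes on version B (the rewrite author's own statement) =====
-- stated objective: alternative
-- what changed: Replaces A's single exhaustive scan maintaining four accumulators with an edge-shrinking search: four early-exiting directional searches (first/last row containing a letter, then first/last column, scanned column-wise), each stopping at its first hit.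
import Mathlib
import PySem

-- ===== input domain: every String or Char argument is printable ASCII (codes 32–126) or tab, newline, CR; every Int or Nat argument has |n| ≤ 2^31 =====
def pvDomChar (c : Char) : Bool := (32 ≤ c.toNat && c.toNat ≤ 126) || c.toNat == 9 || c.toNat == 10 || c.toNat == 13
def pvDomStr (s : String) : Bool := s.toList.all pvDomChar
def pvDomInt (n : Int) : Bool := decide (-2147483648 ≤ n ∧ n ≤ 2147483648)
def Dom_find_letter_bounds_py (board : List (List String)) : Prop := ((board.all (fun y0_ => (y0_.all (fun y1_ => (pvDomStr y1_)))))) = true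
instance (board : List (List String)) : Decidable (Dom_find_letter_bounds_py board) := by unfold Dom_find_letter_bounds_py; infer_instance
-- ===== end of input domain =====

-- B replaces A's exhaustive four-accumulator scan by an edge-shrinking search:
-- first/last row containing a letter, then first/last column, each search
-- stopping at its first hit (objective: alternative).
-- ===== PORT A =====
def find_letter_bounds_py (board : List (List String)) : Option (Int × Int × Int × Int) :=
  let rows := board.length
  if rows = 0 then none
  else
    let cols := (board.headD []).length
    let st : Int × Int × Int × Int :=
      (List.range rows).foldl (fun s r =>
        (List.range cols).foldl (fun s c =>
          let value := (board.getD r []).getD c ""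
          if value = "#" ∨ value = "" then s
          else
            (if (r : Int) < s.1 then (r : Int) else s.1,
             if (r : Int) > s.2.1 then (r : Int) else s.2.1,
             if (c : Int) < s.2.2.1 then (c : Int) else s.2.2.1,
             if (c : Int) > s.2.2.2 then (c : Int) else s.2.2.2)) s)
        ((rows : Int), -1, (cols : Int), -1)
    if st.2.1 = -1 ∨ st.2.2.2 = -1 then none
    else some (st.1, st.2.1, st.2.2.1, st.2.2.2)

-- ===== PORT B =====
-- Source B's `letter(r, c)` predicate
def pvLetter (board : List (List String)) (r c : Nat) : Bool :=
  if (board.getD r []).getD c "" = "#" ∨ (board.getD r []).getD c "" = "" then false else true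

-- Source B's `row_has(r)` / `col_has(c)`
def pvRowHas (board : List (List String)) (cols r : Nat) : Bool :=
  (List.range cols).any (fun c => pvLetter board r c)
def pvColHas (board : List (List String)) (rows c : Nat) : Bool :=
  (List.range rows).any (fun r => pvLetter board r c)

def find_letter_bounds_py_alt (board : List (List String)) : Option (Int × Int × Int × Int) :=
  let rows := board.length
  if rows = 0 then none
  else
    let cols := (board.headD []).length
    match (List.range rows).find? (pvRowHas board cols) with
    | none => none
    | some min_row =>
      -- the remaining three searches cannot fail (a letter cell exists);
      -- Source B's bare next(...) would raise there, so the none-arm is unreachable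
      match (List.range rows).reverse.find? (pvRowHas board cols),
            (List.range cols).find? (pvColHas board rows),
            (List.range cols).reverse.find? (pvColHas board rows) with
      | some max_row, some min_col, some max_col =>
          some ((min_row : Int), (max_row : Int), (min_col : Int), (max_col : Int))
      | _, _, _ => none

-- ===== PRECONDITION & SPEC =====
-- Pre_ excludes ragged boards where some row is shorter than the first row: there
-- the Python A raises IndexError at board[r][c].
def Pre_find_letter_bounds_py (board : List (List String)) : Prop :=
  ∀ row ∈ board, (board.headD []).length ≤ row.length
instance (board : List (List String)) : Decidable (Pre_find_letter_bounds_py board) := by unfold Pre_find_letter_bounds_py; infer_instance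
def pvWitness_find_letter_bounds_py : List (List String) := [["A", "#"], ["", "B"]]

def Spec_find_letter_bounds_py (board : List (List String)) (out : Option (Int × Int × Int × Int)) : Prop := out = find_letter_bounds_py_alt board
instance (board : List (List String)) (out : Option (Int × Int × Int × Int)) : Decidable (Spec_find_letter_bounds_py board out) := by unfold Spec_find_letter_bounds_py; infer_instance

-- ===== CLAIM (what is proved, stated in full; the proofs are below) =====
def Claim_equal_find_letter_bounds_py : Prop := ∀ (board : List (List String)), Dom_find_letter_bounds_py board → Pre_find_letter_bounds_py board → Spec_find_letter_bounds_py board (find_letter_bounds_py board)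

-- ===== LEMMAS AND PROOFS =====

-- the kept coordinate of one cell, used to characterise A's loop
def pvCell (board : List (List String)) (r c : Nat) : Option (Int × Int) :=
  if pvLetter board r c then some ((r : Int), (c : Int)) else none

def pvStep (s : Int × Int × Int × Int) (p : Int × Int) : Int × Int × Int × Int :=
  (min s.1 p.1, max s.2.1 p.1, min s.2.2.1 p.2, max s.2.2.2 p.2)

-- A's update of the four accumulators is pvStep
theorem step_eq (s : Int × Int × Int × Int) (r c : Int) :
    ((if r < s.1 then r else s.1, if r > s.2.1 then r else s.2.1,
      if c < s.2.2.1 then c else s.2.2.1, if c > s.2.2.2 then c else s.2.2.2)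
      : Int × Int × Int × Int) = pvStep s (r, c) := by
  simp only [pvStep, Prod.mk.injEq]
  refine ⟨?_, ?_, ?_, ?_⟩ <;> split_ifs <;> omega

-- A's inner loop over one row = fold of pvStep over the kept cells of that row
theorem inner_eq (board : List (List String)) (r : Nat) (l : List Nat)
    (s : Int × Int × Int × Int) :
    l.foldl (fun s c =>
        if (board.getD r []).getD c "" = "#" ∨ (board.getD r []).getD c "" = "" then s
        else
          (if (r : Int) < s.1 then (r : Int) else s.1,
           if (r : Int) > s.2.1 then (r : Int) else s.2.1,
           if (c : Int) < s.2.2.1 then (c : Int) else s.2.2.1,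
           if (c : Int) > s.2.2.2 then (c : Int) else s.2.2.2)) s
      = (l.filterMap (pvCell board r)).foldl pvStep s := by
  induction l generalizing s with
  | nil => rfl
  | cons c t ih =>
    rw [List.foldl_cons, List.filterMap_cons]
    by_cases h : (board.getD r []).getD c "" = "#" ∨ (board.getD r []).getD c "" = ""
    · rw [show pvCell board r c = none from by unfold pvCell pvLetter; rw [if_pos h]; rfl]
      rw [if_pos h]
      exact ih s
    · rw [show pvCell board r c = some ((r : Int), (c : Int)) from by
        unfold pvCell pvLetter; rw [if_neg h]; rfl]
      rw [if_neg h, List.foldl_cons, step_eq]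
      exact ih _

-- A's double loop = fold of pvStep over the flattened kept-cell list
theorem outer_eq (board : List (List String)) (cols : Nat) (l : List Nat)
    (s : Int × Int × Int × Int) :
    l.foldl (fun s r =>
        (List.range cols).foldl (fun s c =>
          if (board.getD r []).getD c "" = "#" ∨ (board.getD r []).getD c "" = "" then s
          else
            (if (r : Int) < s.1 then (r : Int) else s.1,
             if (r : Int) > s.2.1 then (r : Int) else s.2.1,
             if (c : Int) < s.2.2.1 then (c : Int) else s.2.2.1,
             if (c : Int) > s.2.2.2 then (c : Int) else s.2.2.2)) s) s
      = (l.flatMap (fun r => (List.range cols).filterMap (pvCell board r))).foldl pvStep s := by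
  induction l generalizing s with
  | nil => rfl
  | cons r t ih =>
    rw [List.foldl_cons, List.flatMap_cons, List.foldl_append, ih]
    congr 1
    exact inner_eq board r (List.range cols) s

-- pvStep fold splits into four independent min/max reductions
theorem foldA_eq_reduce (L : List (Int × Int)) (s : Int × Int × Int × Int) :
    L.foldl pvStep s =
      (L.foldl (fun m p => min m p.1) s.1,
       L.foldl (fun m p => max m p.1) s.2.1,
       L.foldl (fun m p => min m p.2) s.2.2.1,
       L.foldl (fun m p => max m p.2) s.2.2.2) := by
  induction L generalizing s with
  | nil => rfl
  | cons p t ih => simp [List.foldl, pvStep, ih]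

-- membership in the kept-cell list
theorem mem_coords (board : List (List String)) (rows cols : Nat) (p : Int × Int) :
    p ∈ (List.range rows).flatMap (fun r => (List.range cols).filterMap (pvCell board r)) ↔
    ∃ r < rows, ∃ c < cols, pvLetter board r c = true ∧ p = ((r : Int), (c : Int)) := by
  simp only [List.mem_flatMap, List.mem_filterMap, List.mem_range, pvCell]
  constructor
  · rintro ⟨r, hr, c, hc, hcell⟩
    by_cases h : pvLetter board r c
    · rw [if_pos h] at hcell
      exact ⟨r, hr, c, hc, h, (Option.some_injective _ hcell).symm⟩
    · rw [if_neg h] at hcell; exact absurd hcell (by simp)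
  · rintro ⟨r, hr, c, hc, h, rfl⟩
    exact ⟨r, hr, c, hc, by rw [if_pos h]⟩

-- forward find? on a range: first index satisfying P
theorem find?_range_fwd (P : Nat → Bool) (n : Nat) :
    ((List.range n).find? P = none → ∀ j < n, ¬ P j = true) ∧
    (∀ k, (List.range n).find? P = some k →
      k < n ∧ P k = true ∧ ∀ j < k, ¬ P j = true) := by
  induction n with
  | zero => simp
  | succ n ih =>
    rw [List.range_succ, List.find?_append]
    cases h : (List.range n).find? P with
    | some k =>
      simp only [Option.some_or]
      obtain ⟨hk, hPk, hmin⟩ := ih.2 k h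
      exact ⟨by simp, fun k' hk' => by
        obtain rfl := Option.some_injective _ hk'
        exact ⟨Nat.lt_succ_of_lt hk, hPk, hmin⟩⟩
    | none =>
      simp only [Option.none_or]
      have hall := ih.1 h
      cases hPn : P n with
      | true =>
        refine ⟨by simp [List.find?, hPn], fun k hk => ?_⟩
        simp only [List.find?, hPn, Option.some.injEq] at hk
        subst hk
        exact ⟨Nat.lt_succ_self n, hPn, hall⟩
      | false =>
        refine ⟨fun _ j hj => ?_, fun k hk => ?_⟩
        · rcases Nat.lt_succ_iff_lt_or_eq.1 hj with hj' | rfl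
          · exact hall j hj'
          · simp [hPn]
        · simp [List.find?, hPn] at hk
-- backward find? on a range: last index satisfying P
theorem find?_range_bwd (P : Nat → Bool) (n : Nat) :
    ((List.range n).reverse.find? P = none → ∀ j < n, ¬ P j = true) ∧
    (∀ k, (List.range n).reverse.find? P = some k →
      k < n ∧ P k = true ∧ ∀ j, k < j → j < n → ¬ P j = true) := by
  induction n with
  | zero => simp
  | succ n ih =>
    have hrev : (List.range (n+1)).reverse = n :: (List.range n).reverse := by
      rw [List.range_succ, List.reverse_append]; rfl
    rw [hrev]
    cases hPn : P n with
    | true =>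
      refine ⟨by simp [List.find?, hPn], fun k hk => ?_⟩
      simp only [List.find?, hPn, Option.some.injEq] at hk
      subst hk
      exact ⟨Nat.lt_succ_self n, hPn, fun j h1 h2 => absurd h2 (by omega)⟩
    | false =>
      simp only [List.find?, hPn]
      refine ⟨fun h j hj => ?_, fun k hk => ?_⟩
      · rcases Nat.lt_succ_iff_lt_or_eq.1 hj with hj' | rfl
        · exact ih.1 h j hj'
        · simp [hPn]
      · obtain ⟨hk1, hk2, hk3⟩ := ih.2 k hk
        refine ⟨Nat.lt_succ_of_lt hk1, hk2, fun j h1 h2 => ?_⟩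
        rcases Nat.lt_succ_iff_lt_or_eq.1 h2 with hj' | rfl
        · exact hk3 j h1 hj'
        · simp [hPn]

-- the min-fold is a lower bound of its inputs and is realised by one of them
theorem foldl_min_spec (f : Int × Int → Int) (l : List (Int × Int)) (a : Int) :
    (l.foldl (fun m p => min m (f p)) a ≤ a ∧
      ∀ p ∈ l, l.foldl (fun m p => min m (f p)) a ≤ f p) ∧
    (l.foldl (fun m p => min m (f p)) a = a ∨
      ∃ p ∈ l, l.foldl (fun m p => min m (f p)) a = f p) := by
  induction l generalizing a with
  | nil => simp
  | cons q t ih =>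
    obtain ⟨⟨h1, h2⟩, h3⟩ := ih (min a (f q))
    simp only [List.foldl_cons, List.mem_cons]
    refine ⟨⟨le_trans h1 (min_le_left _ _), ?_⟩, ?_⟩
    · rintro p (rfl | hp)
      · exact le_trans h1 (min_le_right _ _)
      · exact h2 p hp
    · rcases h3 with h | ⟨p, hp, hq⟩
      · rcases min_choice a (f q) with hc | hc
        · exact Or.inl (h.trans hc)
        · exact Or.inr ⟨q, Or.inl rfl, h.trans hc⟩
      · exact Or.inr ⟨p, Or.inr hp, hq⟩

theorem foldl_max_spec (f : Int × Int → Int) (l : List (Int × Int)) (a : Int) :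
    (a ≤ l.foldl (fun m p => max m (f p)) a ∧
      ∀ p ∈ l, f p ≤ l.foldl (fun m p => max m (f p)) a) ∧
    (l.foldl (fun m p => max m (f p)) a = a ∨
      ∃ p ∈ l, l.foldl (fun m p => max m (f p)) a = f p) := by
  induction l generalizing a with
  | nil => simp
  | cons q t ih =>
    obtain ⟨⟨h1, h2⟩, h3⟩ := ih (max a (f q))
    simp only [List.foldl_cons, List.mem_cons]
    refine ⟨⟨le_trans (le_max_left _ _) h1, ?_⟩, ?_⟩
    · rintro p (rfl | hp)
      · exact le_trans (le_max_right _ _) h1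
      · exact h2 p hp
    · rcases h3 with h | ⟨p, hp, hq⟩
      · rcases max_choice a (f q) with hc | hc
        · exact Or.inl (h.trans hc)
        · exact Or.inr ⟨q, Or.inl rfl, h.trans hc⟩
      · exact Or.inr ⟨p, Or.inr hp, hq⟩

theorem rowHas_iff (board : List (List String)) (cols r : Nat) :
    pvRowHas board cols r = true ↔ ∃ c < cols, pvLetter board r c = true := by
  simp [pvRowHas, List.any_eq_true, List.mem_range]

theorem colHas_iff (board : List (List String)) (rows c : Nat) :
    pvColHas board rows c = true ↔ ∃ r < rows, pvLetter board r c = true := by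
  simp [pvColHas, List.any_eq_true, List.mem_range]

-- ===== VERDICT (by name: the statement is the Claim_ definition above) =====
theorem find_letter_bounds_py_spec : Claim_equal_find_letter_bounds_py := by
  intro board _ _
  unfold Spec_find_letter_bounds_py
  match board with
  | [] => rfl
  | row0 :: tl =>
    have hne : ¬((row0 :: tl).length = 0) := by simp
    simp only [find_letter_bounds_py, find_letter_bounds_py_alt, List.headD_cons]
    rw [if_neg hne, if_neg hne]
    rw [outer_eq (row0 :: tl) row0.length (List.range (row0 :: tl).length)]
    set n := (row0 :: tl).length with hn
    set m := row0.length with hm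
    have hmem := mem_coords (row0 :: tl) n m
    generalize hL : (List.range n).flatMap
        (fun r => (List.range m).filterMap (pvCell (row0 :: tl) r)) = L at *
    cases L with
    | nil =>
      -- no letter cell: A gives none; B's forward row search fails
      have hf : (List.range n).find? (pvRowHas (row0 :: tl) m) = none := by
        cases h : (List.range n).find? (pvRowHas (row0 :: tl) m) with
        | none => rfl
        | some k =>
          obtain ⟨hk, hPk, _⟩ := (find?_range_fwd _ n).2 k h
          obtain ⟨c, hc, hl⟩ := (rowHas_iff _ m k).1 hPk
          exact absurd ((hmem _).2 ⟨k, hk, c, hc, hl, rfl⟩) (by simp)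
      simp [hf, List.foldl]
    | cons p rest =>
      obtain ⟨r0, c0⟩ := p
      -- the head is a letter cell
      obtain ⟨ra, hra, ca, hca, hla, hpa⟩ := (hmem (r0, c0)).1 (List.mem_cons_self ..)
      obtain ⟨rfl, rfl⟩ := Prod.mk.injEq .. ▸ hpa
      -- all four of B's searches succeed
      have hPr : pvRowHas (row0 :: tl) m ra = true := (rowHas_iff _ m ra).2 ⟨ca, hca, hla⟩
      have hPc : pvColHas (row0 :: tl) n ca = true := (colHas_iff _ n ca).2 ⟨ra, hra, hla⟩
      obtain ⟨k1, hk1⟩ : ∃ k, (List.range n).find? (pvRowHas (row0 :: tl) m) = some k := by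
        cases h : (List.range n).find? (pvRowHas (row0 :: tl) m) with
        | none => exact absurd hPr ((find?_range_fwd _ n).1 h ra hra)
        | some k => exact ⟨k, rfl⟩
      obtain ⟨k2, hk2⟩ : ∃ k, (List.range n).reverse.find? (pvRowHas (row0 :: tl) m) = some k := by
        cases h : (List.range n).reverse.find? (pvRowHas (row0 :: tl) m) with
        | none => exact absurd hPr ((find?_range_bwd _ n).1 h ra hra)
        | some k => exact ⟨k, rfl⟩
      obtain ⟨k3, hk3⟩ : ∃ k, (List.range m).find? (pvColHas (row0 :: tl) n) = some k := by
        cases h : (List.range m).find? (pvColHas (row0 :: tl) n) with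
        | none => exact absurd hPc ((find?_range_fwd _ m).1 h ca hca)
        | some k => exact ⟨k, rfl⟩
      obtain ⟨k4, hk4⟩ : ∃ k, (List.range m).reverse.find? (pvColHas (row0 :: tl) n) = some k := by
        cases h : (List.range m).reverse.find? (pvColHas (row0 :: tl) n) with
        | none => exact absurd hPc ((find?_range_bwd _ m).1 h ca hca)
        | some k => exact ⟨k, rfl⟩
      obtain ⟨hk1n, hPk1, hmin1⟩ := (find?_range_fwd _ n).2 k1 hk1
      obtain ⟨hk2n, hPk2, hmax2⟩ := (find?_range_bwd _ n).2 k2 hk2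
      obtain ⟨hk3m, hPk3, hmin3⟩ := (find?_range_fwd _ m).2 k3 hk3
      obtain ⟨hk4m, hPk4, hmax4⟩ := (find?_range_bwd _ m).2 k4 hk4
      rw [foldA_eq_reduce]
      simp only [List.foldl_cons, hk1, hk2, hk3, hk4]
      -- simplify the sentinels at the head cell
      have e1 : min ((n : Nat) : Int) (ra : Int) = (ra : Int) := by
        have : (ra : Int) < (n : Int) := by exact_mod_cast hra
        omega
      have e2 : max (-1 : Int) (ra : Int) = (ra : Int) := by omega
      have e3 : min ((m : Nat) : Int) (ca : Int) = (ca : Int) := by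
        have : (ca : Int) < (m : Int) := by exact_mod_cast hca
        omega
      have e4 : max (-1 : Int) (ca : Int) = (ca : Int) := by omega
      simp only [e1, e2, e3, e4]
      -- each reduction equals the corresponding directional search result
      obtain ⟨⟨m1a, m1b⟩, m1r⟩ := foldl_min_spec (fun p => p.1) rest (ra : Int)
      obtain ⟨⟨m2a, m2b⟩, m2r⟩ := foldl_max_spec (fun p => p.1) rest (ra : Int)
      obtain ⟨⟨m3a, m3b⟩, m3r⟩ := foldl_min_spec (fun p => p.2) rest (ca : Int)
      obtain ⟨⟨m4a, m4b⟩, m4r⟩ := foldl_max_spec (fun p => p.2) rest (ca : Int)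
      -- every element's row index is ≥ k1, ≤ k2; column index ≥ k3, ≤ k4
      have hrow_lo : ∀ p ∈ ((ra : Int), (ca : Int)) :: rest, (k1 : Int) ≤ p.1 := by
        intro p hp
        obtain ⟨r, hr, c, hc, hl, rfl⟩ := (hmem p).1 hp
        have : ¬ r < k1 := fun h => hmin1 r h ((rowHas_iff _ m r).2 ⟨c, hc, hl⟩)
        show (k1 : Int) ≤ (r : Int)
        exact_mod_cast Nat.le_of_not_lt this
      have hrow_hi : ∀ p ∈ ((ra : Int), (ca : Int)) :: rest, p.1 ≤ (k2 : Int) := by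
        intro p hp
        obtain ⟨r, hr, c, hc, hl, rfl⟩ := (hmem p).1 hp
        have : ¬ k2 < r := fun h => hmax2 r h hr ((rowHas_iff _ m r).2 ⟨c, hc, hl⟩)
        show (r : Int) ≤ (k2 : Int)
        exact_mod_cast Nat.le_of_not_lt this
      have hcol_lo : ∀ p ∈ ((ra : Int), (ca : Int)) :: rest, (k3 : Int) ≤ p.2 := by
        intro p hp
        obtain ⟨r, hr, c, hc, hl, rfl⟩ := (hmem p).1 hp
        have : ¬ c < k3 := fun h => hmin3 c h ((colHas_iff _ n c).2 ⟨r, hr, hl⟩)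
        show (k3 : Int) ≤ (c : Int)
        exact_mod_cast Nat.le_of_not_lt this
      have hcol_hi : ∀ p ∈ ((ra : Int), (ca : Int)) :: rest, p.2 ≤ (k4 : Int) := by
        intro p hp
        obtain ⟨r, hr, c, hc, hl, rfl⟩ := (hmem p).1 hp
        have : ¬ k4 < c := fun h => hmax4 c h hc ((colHas_iff _ n c).2 ⟨r, hr, hl⟩)
        show (c : Int) ≤ (k4 : Int)
        exact_mod_cast Nat.le_of_not_lt this
      -- k1 and k2 are realised by some letter cell, hence in L
      obtain ⟨c1, hc1, hl1⟩ := (rowHas_iff _ m k1).1 hPk1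
      have hk1L : ((k1 : Int), (c1 : Int)) ∈ ((ra : Int), (ca : Int)) :: rest :=
        (hmem _).2 ⟨k1, hk1n, c1, hc1, hl1, rfl⟩
      obtain ⟨c2, hc2, hl2⟩ := (rowHas_iff _ m k2).1 hPk2
      have hk2L : ((k2 : Int), (c2 : Int)) ∈ ((ra : Int), (ca : Int)) :: rest :=
        (hmem _).2 ⟨k2, hk2n, c2, hc2, hl2, rfl⟩
      obtain ⟨r3, hr3, hl3⟩ := (colHas_iff _ n k3).1 hPk3
      have hk3L : ((r3 : Int), (k3 : Int)) ∈ ((ra : Int), (ca : Int)) :: rest :=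
        (hmem _).2 ⟨r3, hr3, k3, hk3m, hl3, rfl⟩
      obtain ⟨r4, hr4, hl4⟩ := (colHas_iff _ n k4).1 hPk4
      have hk4L : ((r4 : Int), (k4 : Int)) ∈ ((ra : Int), (ca : Int)) :: rest :=
        (hmem _).2 ⟨r4, hr4, k4, hk4m, hl4, rfl⟩
      -- the four equalities
      have E1 : rest.foldl (fun m p => min m p.1) (ra : Int) = (k1 : Int) := by
        refine le_antisymm ?_ ?_
        · cases hk1L with
          | head => exact m1a
          | tail _ h => exact m1b _ h
        · rcases m1r with h | ⟨p, hp, hq⟩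
          · rw [h]; exact hrow_lo _ (List.mem_cons_self ..)
          · rw [hq]; exact hrow_lo p (List.mem_cons_of_mem _ hp)
      have E2 : rest.foldl (fun m p => max m p.1) (ra : Int) = (k2 : Int) := by
        refine le_antisymm ?_ ?_
        · rcases m2r with h | ⟨p, hp, hq⟩
          · rw [h]; exact hrow_hi _ (List.mem_cons_self ..)
          · rw [hq]; exact hrow_hi p (List.mem_cons_of_mem _ hp)
        · cases hk2L with
          | head => exact m2a
          | tail _ h => exact m2b _ h
      have E3 : rest.foldl (fun m p => min m p.2) (ca : Int) = (k3 : Int) := by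
        refine le_antisymm ?_ ?_
        · cases hk3L with
          | head => exact m3a
          | tail _ h => exact m3b _ h
        · rcases m3r with h | ⟨p, hp, hq⟩
          · rw [h]; exact hcol_lo _ (List.mem_cons_self ..)
          · rw [hq]; exact hcol_lo p (List.mem_cons_of_mem _ hp)
      have E4 : rest.foldl (fun m p => max m p.2) (ca : Int) = (k4 : Int) := by
        refine le_antisymm ?_ ?_
        · rcases m4r with h | ⟨p, hp, hq⟩
          · rw [h]; exact hcol_hi _ (List.mem_cons_self ..)
          · rw [hq]; exact hcol_hi p (List.mem_cons_of_mem _ hp)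
        · cases hk4L with
          | head => exact m4a
          | tail _ h => exact m4b _ h
      have hne2 : ¬(rest.foldl (fun m p => max m p.1) (ra : Int) = -1 ∨
          rest.foldl (fun m p => max m p.2) (ca : Int) = -1) := by
        rw [E2, E4]
        rintro (h | h) <;> omega
      rw [if_neg hne2, E1, E2, E3, E4]
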